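-- pv_equiv track=rewrite | github.com/zxzhangragnar/CycleFlux | inst/python/find_cycles_order.py | get_2_reverse_path
-- ===== SOURCE A (Python) =====
-- def get_2_reverse_path(test_2d_list):
--     result_list = []
--     for list1 in test_2d_list:
--         if len(result_list) == 2:
--             break
--         for list2 in test_2d_list:
--             if list1 == list(reversed(list2)):
--                 result_list.append(list1)
--                 result_list.append(list2)
--                 break
--     return result_list
-- ===== SOURCE B (Python) =====
-- def get_2_reverse_path(test_2d_list):
--     # Stage 1: index every distinct list by its first-occurrence position.
--     first = {}
--     for i, l in enumerate(test_2d_list):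
--         first.setdefault(tuple(l), i)
--     # Stage 2: argmin over the dict: smallest first-occurrence index whose
--     # reversed key is also a key (a palindrome matches itself, as in A).
--     best = None
--     for key, i in first.items():
--         if key[::-1] in first and (best is None or i < best):
--             best = i
--     if best is None:
--         return []
--     l = test_2d_list[best]
--     return [l, l[::-1]]
-- ===== Notes on version B (the rewrite author's own statement) =====
-- stated objective: faster
-- what changed: Replaces A's nested scan-with-break by a staged argmin: one pass builds a first-occurrence-index dict of the distinct lists, then a loop over the dict entries (not over the input) takes the minimum index whose reversed key is also a key, and the answer is reconstructed from that index.
import Mathlib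
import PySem

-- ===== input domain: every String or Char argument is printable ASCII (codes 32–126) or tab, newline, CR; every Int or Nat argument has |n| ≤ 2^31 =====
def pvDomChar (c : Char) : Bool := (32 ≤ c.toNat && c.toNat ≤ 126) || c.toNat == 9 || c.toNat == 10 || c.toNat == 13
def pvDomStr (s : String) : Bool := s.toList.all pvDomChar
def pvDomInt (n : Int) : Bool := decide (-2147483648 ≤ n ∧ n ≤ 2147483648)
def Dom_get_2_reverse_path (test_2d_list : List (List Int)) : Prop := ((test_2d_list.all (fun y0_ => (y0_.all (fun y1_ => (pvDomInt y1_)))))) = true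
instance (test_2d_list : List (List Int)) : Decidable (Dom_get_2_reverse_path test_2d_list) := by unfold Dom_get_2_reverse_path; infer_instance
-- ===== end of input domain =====

-- B replaces A's nested scan-with-break by a staged argmin over a first-occurrence
-- index dict of the distinct lists (objective: faster, asymptotically).

-- ===== PORT A =====
-- inner 'for list2 in test_2d_list': appends list1 and list2 and breaks on the first match
def pvInnerA (list1 : List Int) (xs : List (List Int)) : List (List Int) :=
  match xs with
  | [] => []
  | list2 :: rest => if list1 = list2.reverse then [list1, list2] else pvInnerA list1 rest

-- outer loop carrying result_list; 'if len(result_list) == 2: break'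
def pvOuterA (all : List (List Int)) (xs : List (List Int)) (res : List (List Int)) : List (List Int) :=
  match xs with
  | [] => res
  | list1 :: rest =>
      if res.length = 2 then res
      else pvOuterA all rest (res ++ pvInnerA list1 all)

def get_2_reverse_path (test_2d_list : List (List Int)) : List (List Int) :=
  pvOuterA test_2d_list test_2d_list []

-- ===== PORT B =====
-- stage 1: 'for i, l in enumerate(xs): first.setdefault(tuple(l), i)'
def pvBuildFirst (xs : List (List Int)) (i : Int) (d : PySem.Dict (List Int) Int) :
    PySem.Dict (List Int) Int :=
  match xs with
  | [] => d
  | l :: rest => pvBuildFirst rest (i + 1) (PySem.Dict.setdefault d l i)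

-- stage 2: 'for key, i in first.items(): if key[::-1] in first and (best is None or i < best): best = i'
def pvBestOf (first : PySem.Dict (List Int) Int) : Option Int :=
  first.items.foldl
    (fun best p =>
      if first.contains p.1.reverse && (best.elim true (fun b => p.2 < b)) then some p.2 else best)
    none

def get_2_reverse_path_alt (test_2d_list : List (List Int)) : List (List Int) :=
  let first := pvBuildFirst test_2d_list 0 PySem.Dict.empty
  match pvBestOf first with
  | none => []
  -- test_2d_list[best]: best is always a valid index here, so pyGet? never misses
  | some b => (PySem.List.pyGet? test_2d_list b).elim [] (fun l => [l, l.reverse])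

-- ===== PRECONDITION & SPEC =====
def Spec_get_2_reverse_path (test_2d_list : List (List Int)) (out : List (List Int)) : Prop := out = get_2_reverse_path_alt test_2d_list
instance (test_2d_list : List (List Int)) (out : List (List Int)) : Decidable (Spec_get_2_reverse_path test_2d_list out) := by unfold Spec_get_2_reverse_path; infer_instance

-- ===== CLAIM (what is proved, stated in full; the proofs are below) =====
def Claim_equal_get_2_reverse_path : Prop := ∀ (test_2d_list : List (List Int)), Dom_get_2_reverse_path test_2d_list → Spec_get_2_reverse_path test_2d_list (get_2_reverse_path test_2d_list)

-- ===== LEMMAS AND PROOFS =====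

-- A's inner loop returns [l1, l1.reverse] iff l1.reverse occurs, else []
theorem pvInnerA_eq (l1 : List Int) (xs : List (List Int)) :
    pvInnerA l1 xs = if l1.reverse ∈ xs then [l1, l1.reverse] else [] := by
  induction xs with
  | nil => simp [pvInnerA]
  | cons l2 rest ih =>
    by_cases h : l1 = l2.reverse
    · subst h; simp [pvInnerA]
    · have h2 : l1.reverse ≠ l2 := by
        intro hc; exact h (by rw [← hc, List.reverse_reverse])
      simp [pvInnerA, h, h2, ih]

theorem pvOuterA_done (all xs : List (List Int)) (a b : List Int) :
    pvOuterA all xs [a, b] = [a, b] := by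
  induction xs with
  | nil => rfl
  | cons l rest ih => simp [pvOuterA]

-- A equals the first-match formulation
theorem pvOuterA_eq_find (all xs : List (List Int)) :
    pvOuterA all xs [] =
      match xs.find? (fun l => decide (l.reverse ∈ all)) with
      | some l => [l, l.reverse]
      | none => [] := by
  induction xs with
  | nil => rfl
  | cons l1 rest ih =>
    by_cases h : l1.reverse ∈ all
    · simp [pvOuterA, pvInnerA_eq, h, List.find?, pvOuterA_done]
    · simp [pvOuterA, pvInnerA_eq, h, List.find?, ih]

-- setdefault in insert form
theorem pv_setdefault_eq (d : PySem.Dict (List Int) Int) (k : List Int) (v : Int) :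
    PySem.Dict.setdefault d k v = if d.contains k then d else d.insert k v := by
  by_cases h : d.contains k = true <;>
    simp [PySem.Dict.setdefault, PySem.Dict.insert, h]

-- dict characterization: get? after building = first-occurrence index
theorem pvBuildFirst_get? (xs : List (List Int)) (i : Int) (d : PySem.Dict (List Int) Int)
    (v : List Int) :
    (pvBuildFirst xs i d).get? v =
      match d.get? v with
      | some j => some j
      | none => if v ∈ xs then some (i + (xs.idxOf v : Int)) else none := by
  induction xs generalizing i d with
  | nil => cases h : d.get? v <;> simp [pvBuildFirst, h]
  | cons l rest ih =>
    rw [pvBuildFirst, ih, pv_setdefault_eq]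
    by_cases hc : d.contains l = true
    · -- key l already present: dict unchanged
      rw [if_pos hc]
      cases hv : d.get? v with
      | some j => simp
      | none =>
        have hne : v ≠ l := by
          intro h; subst h
          rw [PySem.Dict.contains_eq_isSome_get?, hv] at hc; simp at hc
        simp only [List.mem_cons, hne, false_or, List.idxOf_cons]
        have : (l == v) = false := by simp [hne.symm]
        simp only [this, cond_false]
        by_cases hm : v ∈ rest
        · simp only [hm, if_true]
          congr 1; push_cast; ring
        · simp [hm]
    · -- key l new: inserted with value i
      rw [if_neg hc]
      by_cases hv : v = l
      · subst hv
        have h0 : d.get? v = none := by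
          rw [PySem.Dict.contains_eq_isSome_get?] at hc
          cases h : d.get? v <;> simp [h] at hc ⊢
        rw [PySem.Dict.get?_insert, if_pos rfl, h0]
        simp
      · rw [PySem.Dict.get?_insert, if_neg hv]
        cases hdv : d.get? v with
        | some j => simp
        | none =>
          simp only [List.mem_cons, hv, false_or, List.idxOf_cons]
          have : (l == v) = false := by simp [Ne.symm hv]
          simp only [this, cond_false]
          by_cases hm : v ∈ rest
          · simp only [hm, if_true]
            congr 1; push_cast; ring
          · simp [hm]

-- keys stay nodup along the build
theorem pvBuildFirst_nodup (xs : List (List Int)) (i : Int) (d : PySem.Dict (List Int) Int)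
    (hd : d.keys.Nodup) : (pvBuildFirst xs i d).keys.Nodup := by
  induction xs generalizing i d with
  | nil => exact hd
  | cons l rest ih =>
    rw [pvBuildFirst, pv_setdefault_eq]
    by_cases hc : d.contains l = true
    · rw [if_pos hc]; exact ih _ _ hd
    · rw [if_neg hc]
      exact ih _ _ (PySem.Dict.nodup_keys_insert d l i hd)

-- B's fold computes the minimum of the filtered indices
theorem pvFoldMin (c : List Int × Int → Bool) (L : List (List Int × Int)) (acc : Option Int) :
    L.foldl (fun best p => if c p && (best.elim true (fun b => p.2 < b)) then some p.2 else best)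
        acc =
      match acc, ((L.filter c).map (·.2)).min? with
      | none, m => m
      | some x, none => some x
      | some x, some y => some (min x y) := by
  induction L generalizing acc with
  | nil => cases acc <;> simp
  | cons p L ih =>
    rw [List.foldl_cons, ih]
    by_cases hc : c p = true
    · have hstep :
          (if c p && (acc.elim true (fun b => p.2 < b)) then some p.2 else acc) =
            some (acc.elim p.2 (fun x => min p.2 x)) := by
        cases acc with
        | none => simp [hc]
        | some x =>
          have hmx : min p.2 x = if p.2 < x then p.2 else x := by
            rw [min_def]; split_ifs <;> omega
          simp only [hc, Bool.true_and, Option.elim, hmx]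
          split_ifs <;> simp_all
      rw [hstep]
      have hfil : (p :: L).filter c = p :: L.filter c := by simp [hc]
      rw [hfil, List.map_cons, List.min?_cons]
      cases acc with
      | none => cases hm : ((L.filter c).map (·.2)).min? <;> simp
      | some x =>
        cases hm : ((L.filter c).map (·.2)).min? with
        | none => simp [min_comm]
        | some y =>
          simp only [Option.elim]
          congr 1
          omega
    · have hcf : c p = false := by simpa using hc
      have hstep : (if c p && (acc.elim true (fun b => p.2 < b)) then some p.2 else acc) = acc := by
        simp [hcf]
      rw [hstep]
      simp [hcf]

-- ===== VERDICT (by name: the statement is the Claim_ definition above) =====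
theorem get_2_reverse_path_spec : Claim_equal_get_2_reverse_path := by
  intro xs _
  unfold Spec_get_2_reverse_path get_2_reverse_path
  rw [pvOuterA_eq_find]
  set p : List Int → Bool := fun l => decide (l.reverse ∈ xs) with hp
  set first := pvBuildFirst xs 0 PySem.Dict.empty with hfirst
  have halt : get_2_reverse_path_alt xs =
      match pvBestOf first with
      | none => []
      | some b => (PySem.List.pyGet? xs b).elim [] (fun l => [l, l.reverse]) := rfl
  rw [halt]
  have hget : ∀ v, first.get? v = if v ∈ xs then some ((xs.idxOf v : Int)) else none := by
    intro v
    rw [hfirst, pvBuildFirst_get?]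
    simp [PySem.Dict.get?_empty]
  have hnodup : first.keys.Nodup := by
    rw [hfirst]
    exact pvBuildFirst_nodup _ _ _ (by simp [PySem.Dict.keys_empty])
  have hcontains : ∀ w, first.contains w = decide (w ∈ xs) := by
    intro w
    rw [PySem.Dict.contains_eq_isSome_get?, hget w]
    by_cases h : w ∈ xs <;> simp [h]
  have hitems : ∀ q ∈ first.items, q.1 ∈ xs ∧ q.2 = (xs.idxOf q.1 : Int) := by
    intro q hq
    have := PySem.Dict.get?_of_mem_items first (k := q.1) (v := q.2) (by cases q; exact hq) hnodup
    rw [hget] at this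
    by_cases h : q.1 ∈ xs
    · rw [if_pos h] at this; exact ⟨h, by simpa using this.symm⟩
    · rw [if_neg h] at this; simp at this
  have hbest :
      pvBestOf first =
        ((first.items.filter (fun q => first.contains q.1.reverse)).map (·.2)).min? := by
    rw [pvBestOf, pvFoldMin]
  cases hfind : xs.findIdx? p with
  | none =>
    have hnone : ∀ x ∈ xs, p x = false := List.findIdx?_eq_none_iff.mp hfind
    have hfnone : xs.find? p = none := by
      rw [List.find?_eq_none]
      intro x hx
      simp [hnone x hx]
    have hfilter : first.items.filter (fun q => first.contains q.1.reverse) = [] := by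
      rw [List.filter_eq_nil_iff]
      intro q hq
      have hmem := (hitems q hq).1
      rw [hcontains]
      have := hnone q.1 hmem
      rw [hp] at this
      simpa using this
    rw [hfnone, hbest, hfilter]
    simp
  | some k =>
    obtain ⟨hk, hpk, hmin⟩ := List.findIdx?_eq_some_iff_getElem.mp hfind
    -- A returns [xs[k], xs[k].reverse]
    have hfindIdx : xs.findIdx p = k :=
      (List.findIdx_eq hk).mpr ⟨hpk, fun j hj => by simpa using hmin j hj⟩
    have hfsome : xs.find? p = some xs[k] := by
      rw [List.find?_eq_getElem?_findIdx, hfindIdx]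
      simp [hk]
    -- xs[k] is its own first occurrence
    have hkmem : xs[k] ∈ xs := List.getElem_mem hk
    have hidxlt : xs.idxOf xs[k] < xs.length := List.idxOf_lt_length_of_mem hkmem
    have hidx_le : xs.idxOf xs[k] ≤ k := by
      by_contra h
      have := List.not_of_lt_findIdx (p := fun x => x == xs[k]) (xs := xs) (i := k)
        (by simpa [List.idxOf] using Nat.lt_of_not_le h)
      simp at this
      exact this rfl
    have hidx_eq : xs.idxOf xs[k] = k := by
      rcases Nat.lt_or_ge (xs.idxOf xs[k]) k with h | h
      · exfalso
        have hel : xs[xs.idxOf xs[k]] = xs[k] := List.getElem_idxOf hidxlt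
        have := hmin _ h
        rw [hel] at this
        exact this hpk
      · omega
    -- the minimum of the filtered indices is k
    have hmem_min :
        ((first.items.filter (fun q => first.contains q.1.reverse)).map (·.2)).min? =
          some (k : Int) := by
      rw [List.min?_eq_some_iff]
      constructor
      · -- (k : Int) is among the filtered indices
        have hq : (xs[k], (k : Int)) ∈ first.items := by
          apply PySem.Dict.mem_items_of_get?_eq_some
          rw [hget, if_pos hkmem, hidx_eq]
        refine List.mem_map.mpr ⟨(xs[k], (k : Int)), List.mem_filter.mpr ⟨hq, ?_⟩, rfl⟩
        rw [hcontains]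
        have := hpk
        rw [hp] at this
        simpa using this
      · -- every filtered index is ≥ k
        intro b hb
        obtain ⟨q, hqf, hqb⟩ := List.mem_map.mp hb
        obtain ⟨hq, hqc⟩ := List.mem_filter.mp hqf
        obtain ⟨hqmem, hqval⟩ := hitems q hq
        have hrev : q.1.reverse ∈ xs := by
          rw [hcontains] at hqc; simpa using hqc
        have hplt : p (xs[xs.idxOf q.1]'(List.idxOf_lt_length_of_mem hqmem)) = true := by
          rw [List.getElem_idxOf]
          rw [hp]; simpa using hrev
        have hk_le : k ≤ xs.idxOf q.1 := by
          by_contra h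
          exact hmin _ (Nat.lt_of_not_le h) hplt
        rw [← hqb, hqval]
        exact_mod_cast hk_le
    rw [hfsome, hbest, hmem_min]
    have hpg : PySem.List.pyGet? xs ((k : Int)) = some xs[k] := by
      rw [PySem.List.pyGet?_natCast xs k, List.getElem?_eq_getElem hk]
    simp [hpg]
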